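-- pv_equiv track=rewrite | github.com/misteryco/PythonAdvanced | Python_Advanced/Multi_Dimensional_List/06_snake_moves.py | matrx_long_string
-- ===== SOURCE A (Python) =====
-- def matrx_long_string(ro: int, co: int, stringa: str):
--     string_ = stringa
--     long_string = ""
--     for i in range(ro*co):
--         if i < len(string_):
--             a = i
--         else:
--             a = i % len(string_)
--         long_string += string_[a]
--     return long_string
-- ===== SOURCE B (Python) =====
-- def matrx_long_string(ro: int, co: int, stringa: str):
--     k = ro * co
--     if k <= 0:
--         return ""
--     return (stringa * (k // len(stringa) + 1))[:k]
-- ===== Notes on version B (the rewrite author's own statement) =====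
-- stated objective: faster
-- what changed: Replaces the per-index loop with repeated mod indexing and string concatenation by a single whole-string repetition (stringa * (k//len+1)) truncated to k characters.
import Mathlib
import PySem

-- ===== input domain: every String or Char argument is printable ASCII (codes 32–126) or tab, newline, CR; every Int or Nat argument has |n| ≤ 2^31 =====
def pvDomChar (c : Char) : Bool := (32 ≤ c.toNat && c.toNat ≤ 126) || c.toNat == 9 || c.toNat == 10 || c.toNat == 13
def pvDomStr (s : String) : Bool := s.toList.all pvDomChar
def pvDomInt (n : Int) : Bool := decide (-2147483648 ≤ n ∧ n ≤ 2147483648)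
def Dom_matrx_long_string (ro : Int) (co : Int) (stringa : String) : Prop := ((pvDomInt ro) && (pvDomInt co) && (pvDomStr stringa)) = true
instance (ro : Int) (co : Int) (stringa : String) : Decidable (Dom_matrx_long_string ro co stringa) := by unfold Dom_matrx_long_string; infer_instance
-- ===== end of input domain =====

-- B replaces A's per-index loop (append one cycled character at a time) by one whole-string
-- repetition truncated to ro*co characters; return-value equivalence on Pre_.

-- ===== PORT A =====
def matrx_long_string (ro : Int) (co : Int) (stringa : String) : String :=
  let string_ := stringa.toList
  let long_string : List Char :=
    (PySem.List.pyRange 0 (ro * co) 1).foldl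
      (fun long_string i =>
        let a : Int := if i < PySem.Chars.len string_ then i else PySem.Int.mod i (PySem.Chars.len string_)
        -- string_[a]: Pre_ guarantees pyGet? = some; none is exactly Python's error case
        long_string ++ ((PySem.List.pyGet? string_ a).map (fun c => [c])).getD [])
      []
  String.ofList long_string

-- ===== PORT B =====
def matrx_long_string_alt (ro : Int) (co : Int) (stringa : String) : String :=
  let k := ro * co
  if k ≤ 0 then ""
  else
    String.ofList (PySem.List.slice
      (PySem.List.pyRepeat stringa.toList (PySem.Int.floordiv k (PySem.Chars.len stringa.toList) + 1))
      none (some k))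

-- ===== PRECONDITION & SPEC =====
-- Pre_ excludes exactly the inputs where Python A raises ZeroDivisionError: an empty stringa
-- with ro*co > 0 (Python B raises the same error there).
def Pre_matrx_long_string (ro : Int) (co : Int) (stringa : String) : Prop :=
  ro * co ≤ 0 ∨ stringa ≠ ""
instance (ro : Int) (co : Int) (stringa : String) : Decidable (Pre_matrx_long_string ro co stringa) := by unfold Pre_matrx_long_string; infer_instance
def pvWitness_matrx_long_string : Int × Int × String := (2, 3, "ab")

def Spec_matrx_long_string (ro : Int) (co : Int) (stringa : String) (out : String) : Prop := out = matrx_long_string_alt ro co stringa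
instance (ro : Int) (co : Int) (stringa : String) (out : String) : Decidable (Spec_matrx_long_string ro co stringa out) := by unfold Spec_matrx_long_string; infer_instance

-- ===== CLAIM (what is proved, stated in full; the proofs are below) =====
def Claim_equal_matrx_long_string : Prop := ∀ (ro : Int) (co : Int) (stringa : String), Dom_matrx_long_string ro co stringa → Pre_matrx_long_string ro co stringa → Spec_matrx_long_string ro co stringa (matrx_long_string ro co stringa)

-- ===== LEMMAS AND PROOFS =====

-- the first m characters of the infinitely cycled string, as a total function
def pvCyc (s : List Char) (m : Nat) : List Char :=
  (List.range m).map (fun j => s.getD (j % s.length) 'x')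

theorem pvCyc_self (s : List Char) : pvCyc s s.length = s := by
  apply List.ext_getElem
  · simp [pvCyc]
  · intro i h1 h2
    simp only [pvCyc, List.length_map, List.length_range] at h1
    simp [pvCyc, Nat.mod_eq_of_lt h1, List.getD_eq_getElem?_getD, List.getElem?_eq_getElem h1]

theorem pvRepeat_eq_cyc (s : List Char) (r : Nat) :
    (List.replicate r s).flatten = pvCyc s (r * s.length) := by
  induction r with
  | zero => simp [pvCyc]
  | succ r ih =>
    have h : (r + 1) * s.length = s.length + r * s.length := by ring
    rw [List.replicate_succ, List.flatten_cons, ih, h]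
    unfold pvCyc
    rw [List.range_add, List.map_append, List.map_map]
    congr 1
    · exact (pvCyc_self s).symm
    · apply List.map_congr_left
      intro j _
      simp [Nat.add_comm]

theorem pvTake_cyc (s : List Char) (m M : Nat) (h : m ≤ M) :
    (pvCyc s M).take m = pvCyc s m := by
  unfold pvCyc
  rw [← List.map_take, List.take_range, Nat.min_eq_left h]

-- A's loop produces the cycled prefix
theorem pvA_loop (s : List Char) (hn : 0 < s.length) (m : Nat) :
    (PySem.List.pyRange 0 ((m : Nat) : Int) 1).foldl
      (fun long_string i =>
        let a : Int := if i < PySem.Chars.len s then i else PySem.Int.mod i (PySem.Chars.len s)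
        long_string ++ ((PySem.List.pyGet? s a).map (fun c => [c])).getD [])
      [] = pvCyc s m := by
  rw [PySem.List.pyRange_zero_natCast]
  have hbody : ∀ (acc : List Char), ∀ x ∈ (List.range m).map (fun k : Nat => (k : Int)),
      (fun long_string (i : Int) =>
        let a : Int := if i < PySem.Chars.len s then i else PySem.Int.mod i (PySem.Chars.len s)
        long_string ++ ((PySem.List.pyGet? s a).map (fun c => [c])).getD []) acc x
      = acc ++ [s.getD (x.toNat % s.length) 'x'] := by
    intro acc x hx
    simp only [List.mem_map, List.mem_range] at hx
    obtain ⟨j, hj, rfl⟩ := hx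
    have hlt : j % s.length < s.length := Nat.mod_lt _ hn
    by_cases hjs : j < s.length
    · simp [PySem.Chars.len_eq, hjs, Nat.mod_eq_of_lt hjs, List.getD_eq_getElem?_getD]
    · have hm : PySem.Int.mod (j : Int) ((s.length : Nat) : Int) = ((j % s.length : Nat) : Int) := by
        rw [PySem.Int.mod_eq_emod_of_pos (by exact_mod_cast hn)]
        exact (Int.natCast_mod j s.length).symm
      have hg : PySem.List.pyGet? s ((j : Int) % ((s.length : Nat) : Int)) = some s[j % s.length] := by
        rw [← Int.natCast_mod, PySem.List.pyGet?_natCast, List.getElem?_eq_getElem hlt]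
      simp [PySem.Chars.len_eq, hjs, hm, hg, List.getD_eq_getElem?_getD,
        List.getElem?_eq_getElem hlt]
  rw [PySem.List.foldl_congr_mem _ _ _ _ hbody,
    PySem.List.foldl_append_singleton_eq_map (f := fun x : Int => s.getD (x.toNat % s.length) 'x')]
  simp [pvCyc, List.map_map, Function.comp_def]

-- B's repeat-and-truncate produces the same cycled prefix
theorem pvB_slice (s : List Char) (hn : 0 < s.length) (m : Nat) :
    PySem.List.slice
      (PySem.List.pyRepeat s (PySem.Int.floordiv ((m : Nat) : Int) (PySem.Chars.len s) + 1))
      none (some ((m : Nat) : Int)) = pvCyc s m := by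
  rw [PySem.List.slice_to _ (by positivity : (0:Int) ≤ ((m : Nat) : Int)), PySem.List.pyRepeat,
    PySem.Chars.len_eq, PySem.Int.floordiv_eq_ediv_of_pos (by exact_mod_cast hn)]
  set r : Nat := ((m : Int) / (s.length : Int) + 1).toNat with hrdef
  have hmr : m ≤ r * s.length := by
    have h1 : (m : Int) / (s.length : Int) * (s.length : Int) + (m : Int) % (s.length : Int) = (m : Int) :=
      Int.ediv_mul_add_emod (m : Int) _
    have h2 : (m : Int) % (s.length : Int) < (s.length : Int) :=
      Int.emod_lt_of_pos _ (by exact_mod_cast hn)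
    have h3 : 0 ≤ (m : Int) / (s.length : Int) := Int.ediv_nonneg (by positivity) (by positivity)
    have h4 : (m : Int) < ((r : Int)) * (s.length : Int) := by
      rw [hrdef, Int.toNat_of_nonneg (by omega)]
      nlinarith
    exact_mod_cast h4.le
  rw [pvRepeat_eq_cyc, Int.toNat_natCast, pvTake_cyc _ _ _ hmr]

-- ===== VERDICT (by name: the statement is the Claim_ definition above) =====
theorem matrx_long_string_spec : Claim_equal_matrx_long_string := by
  intro ro co stringa _ hpre
  unfold Spec_matrx_long_string
  simp only [matrx_long_string, matrx_long_string_alt]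
  by_cases hk : ro * co ≤ 0
  · have hr : PySem.List.pyRange 0 (ro * co) 1 = [] := by
      unfold PySem.List.pyRange
      rw [if_neg (by norm_num : (1:Int) ≠ 0), if_pos (by norm_num : (0:Int) < 1),
        if_neg (by omega : ¬ (0:Int) < ro * co)]
      simp
    rw [if_pos hk, hr]
    rfl
  · have hs : stringa.toList ≠ [] := by
      rcases hpre with h | h
      · omega
      · intro hc; exact h (String.toList_inj.mp (by rw [hc]; rfl))
    have hn : 0 < stringa.toList.length := List.length_pos_iff.mpr hs
    obtain ⟨m, hm⟩ : ∃ m : Nat, ro * co = (m : Int) :=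
      ⟨(ro * co).toNat, (Int.toNat_of_nonneg (by omega)).symm⟩
    rw [if_neg hk, hm, pvA_loop _ hn, pvB_slice _ hn]
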